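-- pv_equiv track=rewrite | github.com/dudamarlena/pyc_source | pycfiles/libopenstorage_openstorage-0.42.24.1-py3-none-any/ygen.cpython-36.py | filter_section
-- ===== SOURCE A (Python) =====
-- def filter_section(lines, tag):
--     filtered_lines = []
--     include = True
--     tag_text = '#--! %s' % tag
--     for line in lines:
--         if line.strip().startswith(tag_text):
--             include = not include
--         else:
--             if include:
--                 filtered_lines.append(line)
--
--     return filtered_lines
-- ===== SOURCE B (Python) =====
-- def filter_section(lines, tag):
--     # Chunk-wise: repeatedly split off the text up to the next marker line,
--     # keeping alternate chunks; marker lines themselves are dropped.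
--     tag_text = '#--! %s' % tag
--     out = []
--     rest = lines
--     keep = True
--     while True:
--         i = next((k for k, l in enumerate(rest)
--                   if l.strip().startswith(tag_text)), None)
--         if i is None:
--             return out + rest if keep else out
--         if keep:
--             out += rest[:i]
--         rest = rest[i + 1:]
--         keep = not keep
-- ===== Notes on version B (the rewrite author's own statement) =====
-- stated objective: alternative
-- what changed: B replaces A's per-line toggle-and-append loop by a chunk-wise reconstruction: it repeatedly locates the next marker line and extends the output with whole slices between markers, keeping alternate chunks.
import Mathlib
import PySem

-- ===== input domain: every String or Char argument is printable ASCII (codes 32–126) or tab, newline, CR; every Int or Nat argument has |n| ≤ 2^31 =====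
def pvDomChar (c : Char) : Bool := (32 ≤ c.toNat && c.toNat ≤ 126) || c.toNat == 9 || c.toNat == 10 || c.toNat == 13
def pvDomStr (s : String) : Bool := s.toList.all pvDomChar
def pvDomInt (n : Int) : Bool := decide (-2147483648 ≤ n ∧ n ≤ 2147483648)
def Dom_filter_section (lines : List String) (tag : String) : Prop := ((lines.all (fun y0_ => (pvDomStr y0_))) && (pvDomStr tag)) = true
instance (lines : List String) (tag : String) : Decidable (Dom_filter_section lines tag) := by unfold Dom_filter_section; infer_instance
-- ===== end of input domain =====

-- B replaces A's per-line toggle-and-append loop by a chunk-wise reconstruction (split at each marker, keep alternate chunks); objective: alternative decomposition, same cost.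


-- ===== PORT A =====
-- A: one pass with a toggle flag, appending each kept line.
def filter_section (lines : List String) (tag : String) : List String :=
  let tag_text := "#--! " ++ tag
  (lines.foldl (fun (st : List String × Bool) line =>
      if PySem.Str.startswith (PySem.Str.strip line) tag_text then
        (st.1, !st.2)
      else if st.2 then (st.1 ++ [line], st.2) else st)
    ([], true)).1

-- ===== PORT B =====
-- B: chunk-wise — split at the next marker (span), keep alternate chunks.
def fsIsMark (tag_text : String) (l : String) : Bool :=
  PySem.Str.startswith (PySem.Str.strip l) tag_text

def fsGo (tag_text : String) (rest : List String) (keep : Bool) : List String :=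
  match h : rest.span (fun l => !fsIsMark tag_text l) with
  | (pre, []) => if keep then pre else []
  | (pre, _ :: suf) => (if keep then pre else []) ++ fsGo tag_text suf (!keep)
termination_by rest.length
decreasing_by
  rw [List.span_eq_takeWhile_dropWhile, Prod.mk.injEq] at h
  have hlen := List.length_dropWhile_le (p := fun l => !fsIsMark tag_text l) (l := rest)
  rw [h.2] at hlen
  simp at hlen ⊢
  omega

def filter_section_alt (lines : List String) (tag : String) : List String :=
  fsGo ("#--! " ++ tag) lines true

-- ===== PRECONDITION & SPEC =====
def Spec_filter_section (lines : List String) (tag : String) (out : List String) : Prop := out = filter_section_alt lines tag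
instance (lines : List String) (tag : String) (out : List String) : Decidable (Spec_filter_section lines tag out) := by unfold Spec_filter_section; infer_instance

-- ===== CLAIM (what is proved, stated in full; the proofs are below) =====
def Claim_equal_filter_section : Prop := ∀ (lines : List String) (tag : String), Dom_filter_section lines tag → Spec_filter_section lines tag (filter_section lines tag)

-- ===== LEMMAS AND PROOFS =====

-- simple accumulator-free recursion characterising A's loop
def fsSimp (t : String) : List String → Bool → List String
  | [], _ => []
  | l :: ls, k =>
    if fsIsMark t l then fsSimp t ls (!k)
    else (if k then [l] else []) ++ fsSimp t ls k

theorem fsFold_eq (t : String) (ls : List String) (acc : List String) (k : Bool) :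
    (ls.foldl (fun (st : List String × Bool) line =>
      if fsIsMark t line then (st.1, !st.2)
      else if st.2 then (st.1 ++ [line], st.2) else st) (acc, k)).1
    = acc ++ fsSimp t ls k := by
  induction ls generalizing acc k with
  | nil => simp [fsSimp]
  | cons l ls ih =>
    by_cases hm : fsIsMark t l
    · simp [fsSimp, hm, ih]
    · cases k <;> simp [fsSimp, hm, ih]

theorem fsSimp_clean (t : String) (pre : List String) (rest : List String) (k : Bool)
    (h : ∀ l ∈ pre, fsIsMark t l = false) :
    fsSimp t (pre ++ rest) k = (if k then pre else []) ++ fsSimp t rest k := by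
  induction pre with
  | nil => simp
  | cons p ps ih =>
    have hp := h p (by simp)
    have hps : ∀ l ∈ ps, fsIsMark t l = false := fun l hl => h l (by simp [hl])
    cases k <;> simp [fsSimp, hp, ih hps]

theorem fsSimp_nomark (t : String) (ls : List String) (k : Bool)
    (h : ∀ l ∈ ls, fsIsMark t l = false) :
    fsSimp t ls k = if k then ls else [] := by
  simpa [fsSimp] using fsSimp_clean t ls [] k h

theorem fsGo_unfold_base (t : String) (rest pre : List String) (k : Bool)
    (h : List.span (fun l => !fsIsMark t l) rest = (pre, [])) :
    fsGo t rest k = if k then pre else [] := by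
  rw [fsGo]
  split
  · next pre' h' =>
      cases (h.symm.trans h')
      rfl
  · next pre' m suf h' =>
      rw [h] at h'
      cases h'

theorem fsGo_unfold_step (t : String) (rest pre : List String) (m : String)
    (suf : List String) (k : Bool)
    (h : List.span (fun l => !fsIsMark t l) rest = (pre, m :: suf)) :
    fsGo t rest k = (if k then pre else []) ++ fsGo t suf (!k) := by
  rw [fsGo]
  split
  · next pre' h' =>
      rw [h] at h'
      cases h'
  · next pre' m' suf' h' =>
      cases (h.symm.trans h')
      rfl

theorem span_facts (t : String) (rest pre : List String) (tl : List String)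
    (h : List.span (fun l => !fsIsMark t l) rest = (pre, tl)) :
    rest = pre ++ tl ∧ ∀ l ∈ pre, fsIsMark t l = false := by
  rw [List.span_eq_takeWhile_dropWhile, Prod.mk.injEq] at h
  constructor
  · have hx := List.takeWhile_append_dropWhile (p := fun l => !fsIsMark t l) (l := rest)
    rw [h.1, h.2] at hx
    exact hx.symm
  · intro l hl
    rw [← h.1] at hl
    have := List.mem_takeWhile_imp hl
    simpa using this

theorem fsGo_eq (t : String) (ls : List String) (k : Bool) :
    fsGo t ls k = fsSimp t ls k := by
  induction ls, k using fsGo.induct t with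
  | case1 rest pre h =>
    obtain ⟨hrest, hclean⟩ := span_facts t rest pre [] h
    rw [fsGo_unfold_base t rest pre true h,
        fsSimp_nomark t rest true (by rw [hrest]; simpa using hclean)]
    simp [hrest]
  | case2 rest k pre h hk =>
    obtain ⟨hrest, hclean⟩ := span_facts t rest pre [] h
    rw [fsGo_unfold_base t rest pre k h,
        fsSimp_nomark t rest k (by rw [hrest]; simpa using hclean)]
    simp [hrest]
  | case3 rest k pre m suf h ih =>
    obtain ⟨hrest, hclean⟩ := span_facts t rest pre (m :: suf) h
    have hm : fsIsMark t m = true := by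
      rw [List.span_eq_takeWhile_dropWhile, Prod.mk.injEq] at h
      have hne : List.dropWhile (fun l => !fsIsMark t l) rest ≠ [] := by
        rw [h.2]; simp
      have hh := List.head_dropWhile_not (fun l => !fsIsMark t l) hne
      simp only [h.2, List.head_cons] at hh
      simpa using hh
    rw [fsGo_unfold_step t rest pre m suf k h, ih, hrest,
        fsSimp_clean t pre (m :: suf) k hclean]
    simp [fsSimp, hm]

theorem filter_section_spec : Claim_equal_filter_section := by
  intro lines tag _
  show filter_section lines tag = filter_section_alt lines tag
  exact (fsFold_eq ("#--! " ++ tag) lines [] true).trans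
    ((fsGo_eq ("#--! " ++ tag) lines true).symm ▸ List.nil_append _)
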